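-- pv_equiv track=rewrite | github.com/ustb-owl/Uranus | util/assembler/mips_asm.py | get32BitHex
-- ===== SOURCE A (Python) =====
-- def get32BitHex(num):
--     chr_list = '0123456789abcdef'
--     k = num
--     s = ''
--     for i in range(8):
--         s = (' ' if i % 2 else '') + chr_list[k & 15] + s
--         k >>= 4
--     return s.strip()
-- ===== SOURCE B (Python) =====
-- def get32BitHex(num):
--     h = '%08x' % (num & 0xFFFFFFFF)
--     return ' '.join(h[i:i + 2] for i in range(0, 8, 2))
-- ===== Notes on version B (the rewrite author's own statement) =====
-- stated objective: simpler
-- what changed: B replaces the 8-step per-nibble loop (with i%2 space interleaving and a final strip) by computing the low 32 bits once with a mask, formatting them as one 8-digit hex string, and joining its two-character byte chunks with spaces.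
import Mathlib
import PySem

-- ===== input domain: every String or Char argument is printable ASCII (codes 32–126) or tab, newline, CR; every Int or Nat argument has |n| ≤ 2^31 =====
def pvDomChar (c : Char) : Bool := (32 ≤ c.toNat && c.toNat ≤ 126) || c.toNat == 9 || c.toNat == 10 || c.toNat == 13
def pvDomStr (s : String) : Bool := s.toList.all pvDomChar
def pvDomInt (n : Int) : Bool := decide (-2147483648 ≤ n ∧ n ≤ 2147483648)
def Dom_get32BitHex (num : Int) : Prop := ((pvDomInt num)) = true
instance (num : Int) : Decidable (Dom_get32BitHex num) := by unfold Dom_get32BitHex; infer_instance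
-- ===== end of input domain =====

-- B replaces A's per-nibble loop (with i%2 space interleaving and a final strip) by masking the
-- low 32 bits once, formatting them as one 8-digit hex string, and joining byte chunks with spaces.

-- ===== PORT A =====
-- Python 'k & 15' is PySem.Int.band k 15; 'k >>= 4' is 'k >>> 4' (Python-exact arithmetic
-- shift); the table index is always in [0,16), so pyGetD's default is never read.
def get32BitHex (num : Int) : String :=
  let chrList : List Char := "0123456789abcdef".toList
  let st := (PySem.List.pyRange 0 8 1).foldl
    (fun (st : Int × List Char) i =>
      (st.1 >>> 4,
       (if PySem.Int.mod i 2 ≠ 0 then [' '] else [])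
         ++ [PySem.List.pyGetD chrList (PySem.Int.band st.1 15) ' ']
         ++ st.2))
    (num, ([] : List Char))
  String.ofList (PySem.Chars.strip st.2)

-- ===== PORT B =====
-- hand port of one digit of '%x': the hex character of a value in [0,16)
def pvHexDigit (d : Int) : Char :=
  PySem.List.pyGetD "0123456789abcdef".toList d '0'

def get32BitHex_alt (num : Int) : String :=
  -- h = '%08x' % (num & 0xFFFFFFFF): 8 hex digits, most significant first (hand port of the
  -- fixed-width format; exact because the masked value is in [0, 16^8))
  let n : Int := PySem.Int.band num 4294967295
  let h : List Char := (List.range 8).map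
    (fun j => pvHexDigit (PySem.Int.band (n >>> (4 * (7 - j))) 15))
  -- ' '.join(h[i:i+2] for i in range(0, 8, 2))
  String.ofList
    (PySem.Chars.join [' ']
      ((PySem.List.pyRange 0 8 2).map (fun i => PySem.List.slice h (some i) (some (i + 2)))))

-- ===== PRECONDITION & SPEC =====
def Spec_get32BitHex (num : Int) (out : String) : Prop := out = get32BitHex_alt num
instance (num : Int) (out : String) : Decidable (Spec_get32BitHex num out) := by unfold Spec_get32BitHex; infer_instance

-- ===== CLAIM (what is proved, stated in full; the proofs are below) =====
def Claim_equal_get32BitHex : Prop := ∀ (num : Int), Dom_get32BitHex num → Spec_get32BitHex num (get32BitHex num)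

-- ===== LEMMAS AND PROOFS =====

theorem band15_eq_emod (k : Int) : PySem.Int.band k 15 = k % 16 := by
  have h1 := Nat.and_two_pow_sub_one_eq_mod k.toNat 4
  have h2 := Nat.and_two_pow_sub_one_eq_mod (-k - 1).toNat 4
  norm_num at h1 h2
  have h3 : (-k - 1).toNat = (-k).toNat - 1 := by omega
  simp only [PySem.Int.band]
  split_ifs with ha hb hb
  · rw [show Int.toNat 15 = 15 from rfl, h1]; omega
  · omega
  · rw [show Int.toNat 15 = 15 from rfl, Nat.and_comm, h3, h2]; omega
  · omega

theorem band_mask32_eq_emod (k : Int) : PySem.Int.band k 4294967295 = k % 4294967296 := by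
  have h1 := Nat.and_two_pow_sub_one_eq_mod k.toNat 32
  have h2 := Nat.and_two_pow_sub_one_eq_mod (-k - 1).toNat 32
  norm_num at h1 h2
  have h3 : (-k - 1).toNat = (-k).toNat - 1 := by omega
  simp only [PySem.Int.band]
  split_ifs with ha hb hb
  · rw [show Int.toNat 4294967295 = 4294967295 from rfl, h1]; omega
  · omega
  · rw [show Int.toNat 4294967295 = 4294967295 from rfl, Nat.and_comm, h3, h2]; omega
  · omega

theorem shift4_eq_div (k : Int) : k >>> (4 : Int) = k / 16 := by
  have h := Int.shiftRight_natCast_right k 4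
  have h2 := Int.shiftRight_eq_div_pow k 4
  norm_num at h h2
  rw [h, h2]


def pvDig (num : Int) (i : Nat) : Char :=
  PySem.List.pyGetD "0123456789abcdef".toList (num / 16 ^ i % 16) '0'

theorem dig_ext (a b : Int) (h : b = a) (h0 : 0 ≤ a) (h1 : a < 16) :
    PySem.List.pyGetD "0123456789abcdef".toList a ' '
      = PySem.List.pyGetD "0123456789abcdef".toList b '0' := by
  have hlen : (("0123456789abcdef".toList).length : Int) = 16 := by decide
  subst h
  rw [PySem.List.pyGetD_eq_getElem _ ' ' h0 (by omega),
      PySem.List.pyGetD_eq_getElem _ '0' h0 (by omega)]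

theorem portA_eq (num : Int) :
    get32BitHex num = String.ofList
      (PySem.Chars.strip
        [' ', pvDig num 7, pvDig num 6, ' ', pvDig num 5, pvDig num 4, ' ',
         pvDig num 3, pvDig num 2, ' ', pvDig num 1, pvDig num 0]) := by
  have hr : PySem.List.pyRange 0 8 1 = [0,1,2,3,4,5,6,7] := by decide
  unfold get32BitHex
  rw [hr]
  simp only [List.foldl, shift4_eq_div]
  norm_num [PySem.Int.mod]
  have e1 : Int.fmod 1 2 = 1 := by decide
  have e3 : Int.fmod 3 2 = 1 := by decide
  have e4 : Int.fmod 4 2 = 0 := by decide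
  have e5 : Int.fmod 5 2 = 1 := by decide
  have e6 : Int.fmod 6 2 = 0 := by decide
  have e7 : Int.fmod 7 2 = 1 := by decide
  have key : ∀ (x : Int) (i : Nat), x = num / 16 ^ i →
      PySem.List.pyGetD "0123456789abcdef".toList (PySem.Int.band x 15) ' ' = pvDig num i := by
    intro x i hx
    rw [hx, band15_eq_emod, pvDig]
    exact dig_ext _ _ rfl (Int.emod_nonneg _ (by norm_num)) (Int.emod_lt_of_pos _ (by norm_num))
  rw [key _ 7 (by omega), key _ 6 (by omega), key _ 5 (by omega),
      key _ 4 (by omega), key _ 3 (by omega), key _ 2 (by omega),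
      key _ 1 (by omega), key num 0 (by norm_num)]
  norm_num [e1, e3, e4, e5, e6, e7]

theorem dig_not_space (num : Int) (i : Nat) :
    PySem.Chars.isspace (pvDig num i) = false := by
  have h0 : (0:Int) ≤ num / 16 ^ i % 16 := Int.emod_nonneg _ (by norm_num)
  have h1 : num / 16 ^ i % 16 < 16 := Int.emod_lt_of_pos _ (by norm_num)
  have hlen : (("0123456789abcdef".toList).length : Int) = 16 := by decide
  have hall : ∀ c ∈ "0123456789abcdef".toList, PySem.Chars.isspace c = false := by
    have h : "0123456789abcdef".toList
        = ['0','1','2','3','4','5','6','7','8','9','a','b','c','d','e','f'] := by decide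
    rw [h]; intro c hc; fin_cases hc <;> decide
  rw [pvDig, PySem.List.pyGetD_eq_getElem _ '0' h0 (by omega)]
  exact hall _ (List.getElem_mem _)

theorem strip_digits (c7 c6 c5 c4 c3 c2 c1 c0 : Char)
    (h7 : PySem.Chars.isspace c7 = false) (h0 : PySem.Chars.isspace c0 = false) :
    PySem.Chars.strip [' ', c7, c6, ' ', c5, c4, ' ', c3, c2, ' ', c1, c0]
      = [c7, c6, ' ', c5, c4, ' ', c3, c2, ' ', c1, c0] := by
  have hsp : PySem.Chars.isspace ' ' = true := by decide
  simp [PySem.Chars.strip, PySem.Chars.lstrip, PySem.Chars.rstrip, List.dropWhile, hsp, h7, h0]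


theorem shiftI0_eq_div (k : Int) : k >>> (0 : Int) = k / 1 := by
  have h := Int.shiftRight_natCast_right k 0
  have h2 := Int.shiftRight_eq_div_pow k 0
  norm_num at h h2
  rw [h]
  norm_num

theorem shiftI8_eq_div (k : Int) : k >>> (8 : Int) = k / 256 := by
  have h := Int.shiftRight_natCast_right k 8
  have h2 := Int.shiftRight_eq_div_pow k 8
  norm_num at h h2
  rw [h]; exact h2

theorem shiftI12_eq_div (k : Int) : k >>> (12 : Int) = k / 4096 := by
  have h := Int.shiftRight_natCast_right k 12
  have h2 := Int.shiftRight_eq_div_pow k 12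
  norm_num at h h2
  rw [h]; exact h2

theorem shiftI16_eq_div (k : Int) : k >>> (16 : Int) = k / 65536 := by
  have h := Int.shiftRight_natCast_right k 16
  have h2 := Int.shiftRight_eq_div_pow k 16
  norm_num at h h2
  rw [h]; exact h2

theorem shiftI20_eq_div (k : Int) : k >>> (20 : Int) = k / 1048576 := by
  have h := Int.shiftRight_natCast_right k 20
  have h2 := Int.shiftRight_eq_div_pow k 20
  norm_num at h h2
  rw [h]; exact h2

theorem shiftI24_eq_div (k : Int) : k >>> (24 : Int) = k / 16777216 := by
  have h := Int.shiftRight_natCast_right k 24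
  have h2 := Int.shiftRight_eq_div_pow k 24
  norm_num at h h2
  rw [h]; exact h2

theorem shiftI28_eq_div (k : Int) : k >>> (28 : Int) = k / 268435456 := by
  have h := Int.shiftRight_natCast_right k 28
  have h2 := Int.shiftRight_eq_div_pow k 28
  norm_num at h h2
  rw [h]; exact h2


theorem portB_eq (num : Int) :
    get32BitHex_alt num = String.ofList
      [pvDig num 7, pvDig num 6, ' ', pvDig num 5, pvDig num 4, ' ',
       pvDig num 3, pvDig num 2, ' ', pvDig num 1, pvDig num 0] := by
  have hr : PySem.List.pyRange 0 8 2 = [0, 2, 4, 6] := by decide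
  have key : ∀ (x : Int) (i : Nat), x % 16 = num / 16 ^ i % 16 →
      pvHexDigit (PySem.Int.band x 15) = pvDig num i := by
    intro x i hx
    rw [pvHexDigit, band15_eq_emod, hx, pvDig]
  unfold get32BitHex_alt
  rw [hr]
  simp only [List.range_succ, List.range_zero, List.nil_append, List.cons_append,
    List.map_cons, List.map_nil, band_mask32_eq_emod]
  norm_num
  simp only [shift4_eq_div, shiftI0_eq_div, shiftI8_eq_div, shiftI12_eq_div,
    shiftI16_eq_div, shiftI20_eq_div, shiftI24_eq_div, shiftI28_eq_div]
  norm_num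
  rw [key _ 7 (by omega), key _ 6 (by omega), key _ 5 (by omega),
      key _ 4 (by omega), key _ 3 (by omega), key _ 2 (by omega),
      key _ 1 (by omega), key _ 0 (by omega)]
  rw [PySem.List.slice_to _ (by norm_num),
      PySem.List.slice_toNat _ (by norm_num) (by norm_num),
      PySem.List.slice_toNat _ (by norm_num) (by norm_num),
      PySem.List.slice_toNat _ (by norm_num) (by norm_num)]
  simp [PySem.Chars.join, List.intercalate]

-- ===== VERDICT (by name: the statement is the Claim_ definition above) =====
theorem get32BitHex_spec : Claim_equal_get32BitHex := by
  intro num _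
  unfold Spec_get32BitHex
  rw [portA_eq, strip_digits _ _ _ _ _ _ _ _ (dig_not_space num 7) (dig_not_space num 0), portB_eq]
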